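-- pv_equiv track=rewrite | github.com/daniel-reich/ubiquitous-fiesta | ANdoCvhhaEibypkDE_6.py | closing_in_sum
-- ===== SOURCE A (Python) =====
-- def closing_in_sum(n):
--     ans = 0
--     n = str(n)
--     for i in range(len(n) // 2):
--         ans += int(n[i] + n[-(i+1)])
--     if len(n) % 2 == 1:
--         ans += int(n[len(n) // 2])
--     return ans
-- ===== SOURCE B (Python) =====
-- def closing_in_sum(n):
--     def peel(s):
--         if not s:
--             return 0
--         if len(s) == 1:
--             return int(s)
--         return int(s[0] + s[-1]) + peel(s[1:-1])
--     return peel(str(n))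
-- ===== Notes on version B (the rewrite author's own statement) =====
-- stated objective: alternative
-- what changed: Replaces the index-arithmetic loop over range(len//2) plus a separate odd-length middle branch by a recursion on the string that peels the outer character pair each call.
import Mathlib
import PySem

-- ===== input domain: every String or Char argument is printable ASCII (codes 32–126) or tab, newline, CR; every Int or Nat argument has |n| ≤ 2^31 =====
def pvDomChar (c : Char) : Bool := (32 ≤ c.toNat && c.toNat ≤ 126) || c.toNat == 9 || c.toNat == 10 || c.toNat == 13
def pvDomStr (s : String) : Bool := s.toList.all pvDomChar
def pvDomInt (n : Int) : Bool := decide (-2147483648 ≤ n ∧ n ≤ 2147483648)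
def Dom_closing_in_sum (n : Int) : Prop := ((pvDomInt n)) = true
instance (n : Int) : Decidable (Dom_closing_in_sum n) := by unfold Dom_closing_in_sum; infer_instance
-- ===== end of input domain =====

-- B peels the outer character pair recursively instead of looping over index pairs with a middle-digit branch.

-- ===== PORT A =====
def closing_in_sum (n : Int) : Int :=
  let s := PySem.Int.toChars n
  let len : Int := s.length
  let ans : Int := (PySem.List.pyRange 0 (PySem.Int.floordiv len 2) 1).foldl
      (fun ans i =>
        ans + (PySem.Int.ofChars? [PySem.List.pyGetD s i ' ',
                                   PySem.List.pyGetD s (-(i+1)) ' ']).getD 0) 0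
  if PySem.Int.mod len 2 == 1 then
    ans + (PySem.Int.ofChars? [PySem.List.pyGetD s (PySem.Int.floordiv len 2) ' ']).getD 0
  else ans

-- ===== PORT B =====
-- peel(s): 0 for '', int(s) for one char, else int(s[0]+s[-1]) + peel(s[1:-1])
def pvPeelChars : List Char → Int
  | [] => 0
  | [c] => (PySem.Int.ofChars? [c]).getD 0
  | c :: rest =>
      (PySem.Int.ofChars? [c, rest.getLastD ' ']).getD 0 + pvPeelChars rest.dropLast
termination_by s => s.length
decreasing_by simp [List.length_dropLast]

def closing_in_sum_alt (n : Int) : Int := pvPeelChars (PySem.Int.toChars n)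

-- ===== PRECONDITION & SPEC =====
def Spec_closing_in_sum (n : Int) (out : Int) : Prop := out = closing_in_sum_alt n
instance (n : Int) (out : Int) : Decidable (Spec_closing_in_sum n out) := by unfold Spec_closing_in_sum; infer_instance

-- ===== CLAIM (what is proved, stated in full; the proofs are below) =====
def Claim_equal_closing_in_sum : Prop := ∀ (n : Int), Dom_closing_in_sum n → Spec_closing_in_sum n (closing_in_sum n)

-- ===== LEMMAS AND PROOFS =====

-- the value A adds for index pair i
def pvPair (s : List Char) (i : Int) : Int :=
  (PySem.Int.ofChars? [PySem.List.pyGetD s i ' ', PySem.List.pyGetD s (-(i+1)) ' ']).getD 0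

lemma pvMain (s : List Char) :
    pvPeelChars s =
      ((List.range (s.length / 2)).map (fun j : Nat => pvPair s ((j : Nat) : Int))).sum
      + (if s.length % 2 = 1
         then (PySem.Int.ofChars? [PySem.List.pyGetD s ((s.length / 2 : Nat) : Int) ' ']).getD 0
         else 0) := by
  induction s using pvPeelChars.induct with
  | case1 => simp [pvPeelChars]
  | case2 c =>
      simp [pvPeelChars, pvPair, PySem.List.pyGetD]
  | case3 c rest hne ih =>
      obtain ⟨m, d, hrest⟩ : ∃ m d, rest = m ++ [d] :=
        ⟨rest.dropLast, rest.getLast (fun h => hne h), (List.dropLast_concat_getLast _).symm⟩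
      subst hrest
      rw [pvPeelChars.eq_3 c (m ++ [d]) (by simp)]
      rw [List.dropLast_concat, List.getLastD_concat] at *
      have hlen : (c :: (m ++ [d])).length = m.length + 2 := by simp
      have hpair0 : pvPair (c :: (m ++ [d])) 0 = (PySem.Int.ofChars? [c, d]).getD 0 := by
        unfold pvPair
        rw [show (c :: (m ++ [d])) = (c :: m) ++ [d] by simp]
        rw [show (-((0:Int)+1)) = -1 by ring, PySem.List.pyGetD_neg_one_append_singleton]
        simp [PySem.List.pyGetD_zero_cons]
      have hshift : ∀ i : Nat, i < m.length →
          pvPair (c :: (m ++ [d])) ((i : Int) + 1) = pvPair m (i : Int) := by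
        intro i hi
        unfold pvPair
        have h1 : PySem.List.pyGetD (c :: (m ++ [d])) ((i : Int) + 1) ' ' = m[i] := by
          rw [show ((i : Int) + 1) = (((i + 1 : Nat)) : Int) by push_cast; ring]
          rw [PySem.List.pyGetD_natCast, List.getD_cons_succ,
              List.getD_append _ _ _ i hi, List.getD_eq_getElem _ _ hi]
        have h2 : PySem.List.pyGetD (c :: (m ++ [d])) (-(((i : Int) + 1) + 1)) ' '
            = m[m.length - (i + 1)]'(by omega) := by
          rw [show (-(((i : Int) + 1) + 1)) = -(((i + 2 : Nat)) : Int) by push_cast; ring]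
          rw [PySem.List.pyGetD_neg_natCast _ _ _ (by omega) (by simp; omega)]
          rw [List.getElem_cons]
          have hne0 : (c :: (m ++ [d])).length - (i + 2) ≠ 0 := by simp; omega
          rw [dif_neg hne0]
          have : (c :: (m ++ [d])).length - (i + 2) - 1 = m.length - (i + 1) := by
            simp; omega
          simp only [this]
          rw [List.getElem_append_left (by omega)]
        have h3 : PySem.List.pyGetD m (i : Int) ' ' = m[i] := by
          rw [PySem.List.pyGetD_natCast, List.getD_eq_getElem _ _ hi]
        have h4 : PySem.List.pyGetD m (-((i : Int) + 1)) ' ' = m[m.length - (i + 1)]'(by omega) := by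
          rw [show (-((i : Int) + 1)) = -(((i + 1 : Nat)) : Int) by push_cast; ring]
          rw [PySem.List.pyGetD_neg_natCast _ _ _ (by omega) (by omega)]
        rw [h1, h2, h3, h4]
      have hmid : m.length % 2 = 1 →
          PySem.List.pyGetD (c :: (m ++ [d])) (((m.length / 2 + 1 : Nat)) : Int) ' '
            = PySem.List.pyGetD m (((m.length / 2 : Nat)) : Int) ' ' := by
        intro hodd
        have hlt : m.length / 2 < m.length := by omega
        rw [PySem.List.pyGetD_natCast, PySem.List.pyGetD_natCast]
        rw [List.getD_cons_succ, List.getD_append _ _ _ _ hlt]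
      rw [hlen]
      rw [show (m.length + 2) / 2 = m.length / 2 + 1 by omega]
      rw [List.range_succ_eq_map, List.map_cons, List.map_map, List.sum_cons]
      have hmapeq : (List.range (m.length / 2)).map
          ((fun j : Nat => pvPair (c :: (m ++ [d])) ((j : Nat) : Int)) ∘ Nat.succ)
          = (List.range (m.length / 2)).map (fun j : Nat => pvPair m ((j : Nat) : Int)) := by
        apply List.map_congr_left
        intro j hj
        have hj' : j < m.length / 2 := List.mem_range.mp hj
        have : ((Nat.succ j : Nat) : Int) = (j : Int) + 1 := by push_cast; ring
        simp only [Function.comp, this]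
        exact hshift j (by omega)
      simp only [Nat.cast_zero]
      rw [hmapeq, hpair0, ih]
      have hmod2 : (m.length + 2) % 2 = m.length % 2 := by omega
      rw [hmod2]
      by_cases hodd : m.length % 2 = 1
      · rw [if_pos hodd, if_pos hodd, hmid hodd]
        ring
      · rw [if_neg hodd, if_neg hodd]
        ring

-- ===== VERDICT (by name: the statement is the Claim_ definition above) =====
theorem closing_in_sum_spec : Claim_equal_closing_in_sum := by
  intro n _
  unfold Spec_closing_in_sum closing_in_sum closing_in_sum_alt
  dsimp only
  set s := PySem.Int.toChars n with hs
  rw [pvMain s]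
  rw [PySem.List.foldl_add]
  have hfd : PySem.Int.floordiv (s.length : Int) 2 = ((s.length / 2 : Nat) : Int) := by
    exact_mod_cast PySem.Int.floordiv_natCast s.length 2
  have hmod : PySem.Int.mod (s.length : Int) 2 = ((s.length % 2 : Nat) : Int) := by
    exact_mod_cast PySem.Int.mod_natCast s.length 2
  rw [hfd, hmod, PySem.List.pyRange_one]
  simp only [sub_zero, Int.toNat_natCast, List.map_map]
  have hmap : (List.range (s.length / 2)).map
      ((fun i => (PySem.Int.ofChars? [PySem.List.pyGetD s i ' ',
          PySem.List.pyGetD s (-(i + 1)) ' ']).getD 0) ∘ fun k : Nat => (0:Int) + ↑k)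
      = (List.range (s.length / 2)).map (fun j : Nat => pvPair s ((j : Nat) : Int)) := by
    apply List.map_congr_left
    intro j _
    simp [pvPair]
  rw [hmap]
  by_cases h : s.length % 2 = 1
  · simp [h]
  · simp [h]
    intro habs
    exfalso
    omega
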